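-- pv_equiv track=rewrite | github.com/daniel-reich/ubiquitous-fiesta | 6NoaFGKJgRW6oXhLC_20.py | sum_of_vowels
-- ===== SOURCE A (Python) =====
-- def sum_of_vowels(txt):
--     count = 0
--     txt = txt.upper()
--     for x in txt:
--         if x == "A":
--             count += 4
--         elif x == "E":
--             count += 3
--         elif x == "I":
--             count += 1
--         else:
--             count += 0
--     return count
-- ===== SOURCE B (Python) =====
-- def sum_of_vowels(txt):
--     u = txt.upper()
--     return u.count("A") * 4 + u.count("E") * 3 + u.count("I")
-- ===== Notes on version B (the rewrite author's own statement) =====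
-- stated objective: idiomatic
-- what changed: Replaces the single accumulator loop with a branch ladder by three independent str.count scans of the uppercased string combined in one arithmetic expression.
import Mathlib
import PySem

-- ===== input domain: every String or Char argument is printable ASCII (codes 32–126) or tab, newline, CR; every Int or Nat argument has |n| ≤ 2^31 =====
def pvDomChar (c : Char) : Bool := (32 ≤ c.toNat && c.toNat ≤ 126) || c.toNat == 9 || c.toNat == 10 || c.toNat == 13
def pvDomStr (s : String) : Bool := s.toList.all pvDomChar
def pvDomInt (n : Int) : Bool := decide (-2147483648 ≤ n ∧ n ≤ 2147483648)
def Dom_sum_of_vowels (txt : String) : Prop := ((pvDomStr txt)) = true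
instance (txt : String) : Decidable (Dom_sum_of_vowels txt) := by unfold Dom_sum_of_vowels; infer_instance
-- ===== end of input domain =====

-- B replaces A's one conditional accumulator pass by three independent count scans combined arithmetically (idiomatic; same cost).

-- ===== PORT A =====
def sum_of_vowels (txt : String) : Int :=
  let t := PySem.Str.upper txt
  t.toList.foldl (fun count x =>
    if x == 'A' then count + 4
    else if x == 'E' then count + 3
    else if x == 'I' then count + 1
    else count + 0) 0

-- ===== PORT B =====
def sum_of_vowels_alt (txt : String) : Int :=
  let u := PySem.Str.upper txt
  (PySem.Str.count u "A" : Int) * 4 + (PySem.Str.count u "E" : Int) * 3 + (PySem.Str.count u "I" : Int)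

-- ===== PRECONDITION & SPEC =====
def Spec_sum_of_vowels (txt : String) (out : Int) : Prop := out = sum_of_vowels_alt txt
instance (txt : String) (out : Int) : Decidable (Spec_sum_of_vowels txt out) := by unfold Spec_sum_of_vowels; infer_instance

-- ===== CLAIM (what is proved, stated in full; the proofs are below) =====
def Claim_equal_sum_of_vowels : Prop := ∀ (txt : String), Dom_sum_of_vowels txt → Spec_sum_of_vowels txt (sum_of_vowels txt)

-- ===== LEMMAS AND PROOFS =====

-- Python str.count of a single-character needle is the character count of the list.
theorem chars_count_go_single (c : Char) (l : List Char) (acc : Nat) :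
    PySem.Chars.count.go [c] l.length l acc = acc + l.count c := by
  induction l generalizing acc with
  | nil => simp [PySem.Chars.count.go]
  | cons h t ih =>
    rw [show (h :: t).length = t.length + 1 from rfl]
    rw [show PySem.Chars.count.go [c] (t.length+1) (h::t) acc
        = if [c].isPrefixOf (h::t) then PySem.Chars.count.go [c] t.length (List.drop 1 (h::t)) (acc+1)
          else PySem.Chars.count.go [c] t.length t acc from rfl]
    by_cases hc : h = c
    · simp [List.isPrefixOf, hc, ih]; omega
    · simp [List.isPrefixOf, hc, ih, Ne.symm hc]

theorem chars_count_single (l : List Char) (c : Char) :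
    PySem.Chars.count l [c] = l.count c := by
  simp [PySem.Chars.count, chars_count_go_single]

-- A's branch-ladder fold evaluates to the weighted character counts.
theorem ladder_fold (cs : List Char) (a : Int) :
    cs.foldl (fun count x =>
      if x == 'A' then count + 4
      else if x == 'E' then count + 3
      else if x == 'I' then count + 1
      else count + 0) a
    = a + (cs.count 'A' : Int) * 4 + (cs.count 'E' : Int) * 3 + (cs.count 'I' : Int) := by
  induction cs generalizing a with
  | nil => simp
  | cons h t ih =>
    simp only [List.foldl_cons, List.count_cons, ih]
    by_cases hA : h = 'A'
    · simp [hA]; ring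
    · by_cases hE : h = 'E'
      · simp [hE]; ring
      · by_cases hI : h = 'I'
        · simp [hI]; ring
        · simp [hA, hE, hI]

-- ===== VERDICT (by name: the statement is the Claim_ definition above) =====
theorem sum_of_vowels_spec : Claim_equal_sum_of_vowels := by
  intro txt _
  unfold Spec_sum_of_vowels sum_of_vowels sum_of_vowels_alt
  simp only [PySem.Str.count_eq, ladder_fold]
  rw [show ("A" : String).toList = ['A'] from rfl, show ("E" : String).toList = ['E'] from rfl,
      show ("I" : String).toList = ['I'] from rfl,
      chars_count_single, chars_count_single, chars_count_single]
  ring
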